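-- pv_equiv track=rewrite | github.com/Chets05/devo | utility/video/video_search_query_generator.py | merge_empty_intervals
-- ===== SOURCE A (Python) =====
-- def merge_empty_intervals(segments):
--     """Merge consecutive segments with no video URL."""
--     if not segments:
--         return [((0, 10), None)]  # Default segment if no segments provided
--
--     merged = []
--     current_segment = list(segments[0])  # Convert to list for mutability
--
--     for segment in segments[1:]:
--         if current_segment[1] is None and segment[1] is None:
--             # Merge consecutive None segments
--             current_segment[0] = (current_segment[0][0], segment[0][1])
--         else:
--             merged.append(tuple(current_segment))  # Convert back to tuple
--             current_segment = list(segment)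
--
--     merged.append(tuple(current_segment))  # Add the last segment
--     return merged
-- ===== SOURCE B (Python) =====
-- from itertools import groupby
--
--
-- def merge_empty_intervals(segments):
--     """Merge consecutive segments with no video URL."""
--     if not segments:
--         return [((0, 10), None)]  # Default segment if no segments provided
--
--     out = []
--     for is_empty, grp in groupby(segments, key=lambda s: s[1] is None):
--         run = list(grp)
--         if is_empty:
--             out.append(((run[0][0][0], run[-1][0][1]), None))
--         else:
--             out.extend(tuple(seg) for seg in run)
--     return out
-- ===== Notes on version B (the rewrite author's own statement) =====
-- stated objective: idiomatic
-- what changed: Replaced the mutable current-segment/merge loop by grouping consecutive segments with itertools.groupby on 'url is None' and emitting each None-run as one merged interval (first start, last end) and each non-None run element-wise.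
import Mathlib
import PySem

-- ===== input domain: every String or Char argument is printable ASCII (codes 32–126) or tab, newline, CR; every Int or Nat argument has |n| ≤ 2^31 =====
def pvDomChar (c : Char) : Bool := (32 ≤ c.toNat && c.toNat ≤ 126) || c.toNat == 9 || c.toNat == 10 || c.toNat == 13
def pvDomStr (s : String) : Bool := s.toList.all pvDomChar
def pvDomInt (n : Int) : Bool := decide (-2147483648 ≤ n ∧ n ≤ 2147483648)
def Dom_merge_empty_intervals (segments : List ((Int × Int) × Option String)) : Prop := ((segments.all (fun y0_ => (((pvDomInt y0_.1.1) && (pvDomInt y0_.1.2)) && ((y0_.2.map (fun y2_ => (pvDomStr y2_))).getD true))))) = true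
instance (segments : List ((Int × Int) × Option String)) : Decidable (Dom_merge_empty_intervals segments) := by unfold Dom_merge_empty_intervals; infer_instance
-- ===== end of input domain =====

-- B merges consecutive None-URL runs via grouping (takeWhile/dropWhile on the None key) instead of A's
-- mutable current-segment accumulator loop; same result, stated for the return value only.

-- ===== PORT A =====
-- the for-loop over segments[1:] with state (merged, current_segment)
def pvLoopA (merged : List ((Int × Int) × Option String))
    (cur : (Int × Int) × Option String) :
    List ((Int × Int) × Option String) → List ((Int × Int) × Option String)
  | [] => merged ++ [cur]
  | seg :: rest =>
    if cur.2.isNone && seg.2.isNone then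
      pvLoopA merged ((cur.1.1, seg.1.2), cur.2) rest
    else
      pvLoopA (merged ++ [cur]) seg rest

def merge_empty_intervals (segments : List ((Int × Int) × Option String)) : List ((Int × Int) × Option String) :=
  match segments with
  | [] => [((0, 10), none)]
  | s0 :: rest => pvLoopA [] s0 rest

-- ===== PORT B =====
-- emit one group: a None-run becomes a single merged interval, a non-None run is emitted element-wise
def pvEmit (s : (Int × Int) × Option String) (run : List ((Int × Int) × Option String)) :
    List ((Int × Int) × Option String) :=
  if s.2.isNone then [((s.1.1, (run.getLastD s).1.2), none)] else s :: run

-- iterate over the maximal runs of equal 'url is None' key (groupby)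
def pvGroups : List ((Int × Int) × Option String) → List ((Int × Int) × Option String)
  | [] => []
  | s :: rest =>
    pvEmit s (rest.takeWhile (fun t => t.2.isNone == s.2.isNone)) ++
      pvGroups (rest.dropWhile (fun t => t.2.isNone == s.2.isNone))
termination_by xs => xs.length
decreasing_by
  simpa using Nat.lt_succ_of_le (List.length_dropWhile_le _ _)

def merge_empty_intervals_alt (segments : List ((Int × Int) × Option String)) : List ((Int × Int) × Option String) :=
  match segments with
  | [] => [((0, 10), none)]
  | _ => pvGroups segments

-- ===== PRECONDITION & SPEC =====
def Spec_merge_empty_intervals (segments : List ((Int × Int) × Option String)) (out : List ((Int × Int) × Option String)) : Prop := out = merge_empty_intervals_alt segments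
instance (segments : List ((Int × Int) × Option String)) (out : List ((Int × Int) × Option String)) : Decidable (Spec_merge_empty_intervals segments out) := by unfold Spec_merge_empty_intervals; infer_instance

-- ===== CLAIM (what is proved, stated in full; the proofs are below) =====
def Claim_equal_merge_empty_intervals : Prop := ∀ (segments : List ((Int × Int) × Option String)), Dom_merge_empty_intervals segments → Spec_merge_empty_intervals segments (merge_empty_intervals segments)

-- ===== LEMMAS AND PROOFS =====

-- the 'merged' accumulator only prefixes the result
theorem pvLoopA_acc (rest : List ((Int × Int) × Option String))
    (merged : List ((Int × Int) × Option String)) (cur : (Int × Int) × Option String) :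
    pvLoopA merged cur rest = merged ++ pvLoopA [] cur rest := by
  induction rest generalizing merged cur with
  | nil => simp [pvLoopA]
  | cons seg rest ih =>
    simp only [pvLoopA, List.nil_append]
    split
    · exact ih _ _
    · rw [ih (merged ++ [cur]) seg, ih [cur] seg, List.append_assoc]

-- prepending a non-None segment just emits it in front
theorem pvGroups_cons_some (cur : (Int × Int) × Option String)
    (h : cur.2.isNone = false) (xs : List ((Int × Int) × Option String)) :
    pvGroups (cur :: xs) = cur :: pvGroups xs := by
  cases xs with
  | nil => simp [pvGroups, pvEmit, h]
  | cons s rest =>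
    rw [pvGroups]
    cases hs : s.2.isNone with
    | false =>
      have hs' : s.2.isSome = true := by cases hv : s.2 <;> simp_all
      rw [pvGroups]
      simp [pvEmit, h, hs, hs']
    | true =>
      have hs' : s.2.isSome = false := by cases hv : s.2 <;> simp_all
      simp [pvEmit, h, hs']

-- two leading None segments group the same after A's one merge step
theorem pvGroups_merge (a b : Int) (s : (Int × Int) × Option String)
    (hs : s.2.isNone = true) (t : List ((Int × Int) × Option String)) :
    pvGroups (((a, b), (none : Option String)) :: s :: t) =
      pvGroups (((a, s.1.2), (none : Option String)) :: t) := by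
  rw [pvGroups, pvGroups]
  simp only [List.takeWhile_cons, List.dropWhile_cons, hs, Option.isNone_none,
    beq_self_eq_true, if_true, pvEmit]
  congr 2
  cases h : t.takeWhile (fun u => u.2.isNone == true) with
  | nil => simp_all [List.getLastD]
  | cons u us =>
    rw [List.getLastD_cons, List.getLastD_cons, List.getLastD_cons]

-- the main invariant: A's loop from state cur equals B's grouping of cur :: rest
theorem pvLoopA_eq_groups (rest : List ((Int × Int) × Option String))
    (cur : (Int × Int) × Option String) :
    pvLoopA [] cur rest = pvGroups (cur :: rest) := by
  induction rest generalizing cur with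
  | nil =>
    cases hc : cur.2 with
    | none =>
      obtain ⟨⟨a, b⟩, u⟩ := cur; cases hc
      simp [pvLoopA, pvGroups, pvEmit]
    | some v =>
      simp [pvLoopA, pvGroups, pvEmit, hc]
  | cons s rest ih =>
    cases hc : cur.2 with
    | none =>
      cases hs : s.2.isNone with
      | true =>
        obtain ⟨⟨a, b⟩, u⟩ := cur; cases hc
        have h1 : pvLoopA [] ((a, b), (none : Option String)) (s :: rest) =
            pvLoopA [] ((a, s.1.2), (none : Option String)) rest := by
          simp [pvLoopA, hs]
        rw [h1, ih, pvGroups_merge a b s hs rest]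
      | false =>
        obtain ⟨⟨a, b⟩, u⟩ := cur; cases hc
        have h1 : pvLoopA [] ((a, b), (none : Option String)) (s :: rest) =
            ((a, b), (none : Option String)) :: pvLoopA [] s rest := by
          simp only [pvLoopA, Option.isNone_none, hs, Bool.true_and, Bool.false_eq_true,
            if_false, List.nil_append]
          rw [pvLoopA_acc rest [((a, b), none)] s]; simp
        rw [h1, ih]
        conv_rhs => rw [pvGroups]
        simp [pvEmit, hs, List.getLastD]
    | some v =>
      have hcf : cur.2.isNone = false := by simp [hc]
      have h1 : pvLoopA [] cur (s :: rest) = cur :: pvLoopA [] s rest := by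
        simp only [pvLoopA, hcf, Bool.false_and, Bool.false_eq_true, if_false, List.nil_append]
        rw [pvLoopA_acc rest [cur] s]; simp
      rw [h1, ih, pvGroups_cons_some cur hcf]

-- ===== VERDICT (by name: the statement is the Claim_ definition above) =====
theorem merge_empty_intervals_spec : Claim_equal_merge_empty_intervals := by
  intro segments _
  unfold Spec_merge_empty_intervals merge_empty_intervals merge_empty_intervals_alt
  cases segments with
  | nil => rfl
  | cons s0 rest => exact pvLoopA_eq_groups rest s0
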